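-- pv_equiv track=rewrite | github.com/motokikando/code_algorithm | atcoder/Medium/c_colorful.py | get_color_type
-- ===== SOURCE A (Python) =====
-- from typing import Tuple, List
--
-- def get_color_type(l:List[int]) -> Tuple[int, int]:
--     s = set()
--     cnt = 0
--     for v in l:
--         type = v//400
--         if v >= 3200:
--             s.add(10)
--             cnt += 1
--         else:
--             s.add(type)
--     if cnt == 0:
--         min = len(s)
--         max = len(s)
--     elif cnt == len(l):
--         min = 1
--         max = cnt
--     else:
--         min = len(s) - 1
--         max = len(s) + (cnt -1)
--     return min, max
-- ===== SOURCE B (Python) =====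
-- from typing import Tuple, List
--
-- def get_color_type(l: List[int]) -> Tuple[int, int]:
--     # Sort-then-run-scan (groupby style) instead of a hash set: map each rating
--     # to a key (its color bucket, capped at 8 for ratings >= 3200, since sub-3200
--     # buckets are at most 7), sort the keys, and walk the runs of equal keys.
--     # Each non-8 run adds one distinct color; the 8-run, which comes last in the
--     # sorted order, is the number of "free color" (>=3200) players.
--     keys = sorted(min(v // 400, 8) for v in l)
--     base = 0
--     wild = 0
--     i, n = 0, len(keys)
--     while i < n:
--         k = keys[i]
--         j = i + 1
--         while j < n and keys[j] == k:
--             j += 1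
--         if k == 8:
--             wild = j - i
--         else:
--             base += 1
--         i = j
--     mn = base if wild == 0 else max(base, 1)
--     return mn, base + wild
-- ===== Notes on version B (the rewrite author's own statement) =====
-- stated objective: alternative
-- what changed: Replaces A's hash-set-with-sentinel single pass and three-way branch by sort-then-run-scan: map ratings to capped bucket keys, sort them, count runs of equal keys (the trailing 8-run is the wild count) and combine with a closed-form min/max.
import Mathlib
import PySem

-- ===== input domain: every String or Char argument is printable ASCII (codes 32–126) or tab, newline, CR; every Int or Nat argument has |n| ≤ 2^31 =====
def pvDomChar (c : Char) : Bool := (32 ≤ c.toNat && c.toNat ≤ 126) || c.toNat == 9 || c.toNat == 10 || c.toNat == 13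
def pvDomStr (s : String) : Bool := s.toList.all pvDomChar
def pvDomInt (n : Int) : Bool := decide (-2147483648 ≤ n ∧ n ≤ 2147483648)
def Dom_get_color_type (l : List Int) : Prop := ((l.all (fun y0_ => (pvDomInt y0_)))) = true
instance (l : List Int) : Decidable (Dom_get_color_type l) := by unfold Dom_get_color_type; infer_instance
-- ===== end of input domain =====

-- B replaces A's sentinel-10 hash set and three-way branch by sort-then-run-scan:
-- map ratings to capped bucket keys, sort, count runs of equal keys, combine with
-- a closed-form min/max; alternative algorithm, no speed claim.

-- ===== PORT A =====
def get_color_type (l : List Int) : Int × Int :=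
  let st := l.foldl (fun (p : PySem.Set Int × Int) v =>
    let t := PySem.Int.floordiv v 400
    if v ≥ 3200 then (PySem.Set.add p.1 10, p.2 + 1) else (PySem.Set.add p.1 t, p.2))
    (PySem.Set.empty, 0)
  let s := st.1
  let cnt := st.2
  if cnt = 0 then ((s.length : Int), (s.length : Int))
  else if cnt = (l.length : Int) then (1, cnt)
  else ((s.length : Int) - 1, (s.length : Int) + (cnt - 1))

-- ===== PORT B =====
/-- B's key: the color bucket, capped at 8 (ratings ≥ 3200 give key 8). -/
def pvKey (v : Int) : Int := min (PySem.Int.floordiv v 400) 8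

/-- B's run scan over the sorted keys: each run of equal keys either sets `wild`
    (key 8) or adds one distinct color (`base`); transcribes Source B's while loops,
    with `keys[i:]` represented as the remaining list. -/
def pvRuns (keys : List Int) (base wild : Int) : Int × Int :=
  match keys with
  | [] => (base, wild)
  | k :: t =>
    let run : Int := 1 + ((t.takeWhile (fun x => x == k)).length : Int)
    let rest := t.dropWhile (fun x => x == k)
    if k = 8 then pvRuns rest base run
    else pvRuns rest (base + 1) wild
termination_by keys.length
decreasing_by
  all_goals exact Nat.lt_succ_of_le (t.length_dropWhile_le _)

def get_color_type_alt (l : List Int) : Int × Int :=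
  let keys := PySem.List.sorted (l.map pvKey) (fun x => x) false
  let bw := pvRuns keys 0 0
  let base := bw.1
  let wild := bw.2
  (if wild = 0 then base else max base 1, base + wild)

-- ===== PRECONDITION & SPEC =====
def Spec_get_color_type (l : List Int) (out : Int × Int) : Prop := out = get_color_type_alt l
instance (l : List Int) (out : Int × Int) : Decidable (Spec_get_color_type l out) := by unfold Spec_get_color_type; infer_instance

-- ===== CLAIM (what is proved, stated in full; the proofs are below) =====
def Claim_equal_get_color_type : Prop := ∀ (l : List Int), Dom_get_color_type l → Spec_get_color_type l (get_color_type l)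

-- ===== LEMMAS AND PROOFS =====

/-- The value A inserts into its set for element v. -/
def pvFA (v : Int) : Int := if v ≥ 3200 then 10 else PySem.Int.floordiv v 400

/-- A's loop is: build set(map pvFA l) and count the wild elements. -/
theorem pvLoopA (l : List Int) (s : PySem.Set Int) (c : Int) :
    l.foldl (fun (p : PySem.Set Int × Int) v =>
      let t := PySem.Int.floordiv v 400
      if v ≥ 3200 then (PySem.Set.add p.1 10, p.2 + 1) else (PySem.Set.add p.1 t, p.2)) (s, c)
    = ((l.map pvFA).foldl PySem.Set.add s, c + (l.countP (fun v => decide (3200 ≤ v)) : Int)) := by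
  induction l generalizing s c with
  | nil => simp
  | cons v tl ih =>
    rw [List.foldl_cons, List.map_cons, List.foldl_cons, List.countP_cons]
    by_cases h : (3200 : Int) ≤ v
    · rw [show (let t := PySem.Int.floordiv v 400;
          if v ≥ 3200 then (PySem.Set.add s 10, c + 1) else (PySem.Set.add s t, c)) =
          ((PySem.Set.add s 10, c + 1) : PySem.Set Int × Int) by simp [h]]
      rw [ih, show pvFA v = 10 by simp [pvFA, h]]
      simp [h]
      ring
    · rw [show (let t := PySem.Int.floordiv v 400;
          if v ≥ 3200 then (PySem.Set.add s 10, c + 1) else (PySem.Set.add s t, c)) =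
          ((PySem.Set.add s (PySem.Int.floordiv v 400), c) : PySem.Set Int × Int) by simp [h]]
      rw [ih, show pvFA v = PySem.Int.floordiv v 400 by simp [pvFA, h]]
      simp [h]

theorem pvColorBound (v : Int) (h : v < 3200) : PySem.Int.floordiv v 400 ≠ 10 := by
  intro hc
  have h10 : (10 : Int) ≤ PySem.Int.floordiv v 400 := le_of_eq hc.symm
  rw [PySem.Int.floordiv,
      show Int.fdiv v 400 = v / 400 by rw [Int.fdiv_eq_ediv]; simp] at h10
  have := (Int.le_ediv_iff_mul_le (by norm_num : (0:Int) < 400)).1 h10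
  omega

theorem pvTenNotMem (l : List Int) :
    (10 : Int) ∉ ((l.filter (fun v => decide (v < 3200))).map (fun v => PySem.Int.floordiv v 400)).toFinset := by
  intro hmem
  simp only [List.mem_toFinset, List.mem_map, List.mem_filter, decide_eq_true_eq] at hmem
  obtain ⟨v, ⟨_, hv⟩, heq⟩ := hmem
  exact pvColorBound v hv heq

/-- The mapped values as a Finset: the colors, plus 10 when some wild element exists. -/
theorem pvToFinset (l : List Int) :
    (l.map pvFA).toFinset
    = (if l.countP (fun v => decide (3200 ≤ v)) = 0 then (∅ : Finset Int) else {10})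
      ∪ ((l.filter (fun v => decide (v < 3200))).map (fun v => PySem.Int.floordiv v 400)).toFinset := by
  induction l with
  | nil => simp
  | cons v tl ih =>
    by_cases h : (3200 : Int) ≤ v
    · have h2 : ¬ (v < 3200) := by omega
      simp only [List.map_cons, List.toFinset_cons, List.countP_cons, List.filter_cons,
        decide_eq_true_eq, if_neg h2, show pvFA v = 10 by simp [pvFA, h], if_pos h, ih]
      by_cases hc : tl.countP (fun v => decide (3200 ≤ v)) = 0
      · simp [hc, Finset.singleton_union]
      · simp [hc, Finset.singleton_union]
    · have h2 : v < 3200 := by omega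
      simp only [List.map_cons, List.toFinset_cons, List.countP_cons, List.filter_cons,
        decide_eq_true_eq, if_pos h2, show pvFA v = PySem.Int.floordiv v 400 by simp [pvFA, h],
        if_neg h, List.map_cons, List.toFinset_cons, ih]
      by_cases hc : tl.countP (fun v => decide (3200 ≤ v)) = 0
      · simp [hc]
      · simp only [hc, Nat.add_zero, ite_false, Finset.union_insert]

/-- Length of a PySem set built by ofList = number of distinct elements. -/
theorem pvLenOfList (xs : List Int) : (PySem.Set.ofList xs).length = xs.toFinset.card := by
  have hn : (PySem.Set.ofList xs).Nodup := PySem.Set.nodup_ofList xs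
  have he : (PySem.Set.ofList xs).toFinset = xs.toFinset := by
    apply Finset.ext; intro a
    simp [List.mem_toFinset, PySem.Set.mem_ofList]
  calc (PySem.Set.ofList xs).length = (PySem.Set.ofList xs).toFinset.card :=
        (List.toFinset_card_of_nodup hn).symm
    _ = xs.toFinset.card := by rw [he]

theorem pvCardEq (l : List Int) :
    (PySem.Set.ofList (l.map pvFA)).length
    = ((l.filter (fun v => decide (v < 3200))).map
        (fun v => PySem.Int.floordiv v 400)).toFinset.card
      + (if l.countP (fun v => decide (3200 ≤ v)) = 0 then 0 else 1) := by
  rw [pvLenOfList, pvToFinset]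
  by_cases hc : l.countP (fun v => decide (3200 ≤ v)) = 0
  · simp [hc]
  · rw [if_neg hc, if_neg hc,
        Finset.card_union_of_disjoint (Finset.disjoint_singleton_left.mpr (pvTenNotMem l))]
    simp [add_comm]

theorem pvArith (B W L S : Int) (hS : S = B + (if W = 0 then 0 else 1))
    (hWL : W = L → B = 0) (hmix : W ≠ 0 → W ≠ L → 1 ≤ B) :
    (if W = 0 then (S, S) else if W = L then ((1:Int), W) else (S - 1, S + (W - 1)))
    = ((if W = 0 then B else max B 1), B + W) := by
  split_ifs at hS ⊢ with h1 h2
  · simp [hS, h1]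
  · have hB := hWL h2
    have : max B 1 = 1 := by omega
    rw [this, hB]; simp
  · have hB := hmix h1 h2
    have : max B 1 = B := by omega
    rw [this, Prod.mk.injEq]
    exact ⟨by omega, by omega⟩

/-- A equals the closed form (B = distinct color count, W = wild count). -/
theorem pvAEq (l : List Int) :
    get_color_type l
    = (let B : Int := (((l.filter (fun v => decide (v < 3200))).map
          (fun v => PySem.Int.floordiv v 400)).toFinset.card : Int)
       let W : Int := (l.countP (fun v => decide (3200 ≤ v)) : Int)
       ((if W = 0 then B else max B 1), B + W)) := by
  unfold get_color_type
  rw [show (PySem.Set.empty : PySem.Set Int) = ([] : List Int) from rfl, pvLoopA,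
      show ((l.map pvFA).foldl PySem.Set.add [] : PySem.Set Int)
        = PySem.Set.ofList (l.map pvFA) from (PySem.Set.ofList_eq_foldl _).symm]
  simp only [zero_add]
  have hcard := pvCardEq l
  refine pvArith _ _ _ _ ?_ ?_ ?_
  · rw [hcard]
    by_cases hz : l.countP (fun v => decide (3200 ≤ v)) = 0
    · rw [if_pos hz, if_pos (by exact_mod_cast hz)]; push_cast; ring
    · rw [if_neg hz, if_neg (by exact_mod_cast hz)]; push_cast; ring
  · intro hWL
    have hall : l.countP (fun v => decide (3200 ≤ v)) = l.length := by exact_mod_cast hWL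
    have hfilt : l.filter (fun v => decide (v < 3200)) = [] := by
      rw [List.filter_eq_nil_iff]
      intro v hv
      have := (List.countP_eq_length.mp hall) v hv
      simp only [decide_eq_true_eq] at this ⊢
      omega
    rw [hfilt]; rfl
  · intro hne hnel
    have hall : l.countP (fun v => decide (3200 ≤ v)) ≠ l.length := by exact_mod_cast hnel
    have hex : ∃ v ∈ l, ¬ ((3200:Int) ≤ v) := by
      by_contra hno
      push Not at hno
      exact hall (List.countP_eq_length.mpr (fun v hv => by simp [hno v hv]))
    obtain ⟨v, hv, hvp⟩ := hex
    have hmem : PySem.Int.floordiv v 400 ∈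
        ((l.filter (fun v => decide (v < 3200))).map (fun v => PySem.Int.floordiv v 400)) := by
      simp only [List.mem_map, List.mem_filter, decide_eq_true_eq]
      exact ⟨v, ⟨hv, by omega⟩, rfl⟩
    have hpos : 0 < ((l.filter (fun v => decide (v < 3200))).map
        (fun v => PySem.Int.floordiv v 400)).toFinset.card :=
      Finset.card_pos.mpr ⟨_, List.mem_toFinset.mpr hmem⟩
    exact_mod_cast hpos

/-- Key facts about pvKey. -/
theorem pvKey_le (v : Int) : pvKey v ≤ 8 := min_le_right _ _

theorem pvKey_eq8_iff (v : Int) : pvKey v = 8 ↔ 3200 ≤ v := by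
  unfold pvKey PySem.Int.floordiv
  rw [show Int.fdiv v 400 = v / 400 by rw [Int.fdiv_eq_ediv]; simp]
  constructor
  · intro h
    have h8 : (8 : Int) ≤ v / 400 := by omega
    have := (Int.le_ediv_iff_mul_le (by norm_num : (0:Int) < 400)).1 h8
    omega
  · intro h
    have h8 : (8 : Int) ≤ v / 400 :=
      (Int.le_ediv_iff_mul_le (by norm_num : (0:Int) < 400)).2 (by omega)
    omega

theorem pvKey_lt (v : Int) (h : v < 3200) : pvKey v = PySem.Int.floordiv v 400 := by
  have : ¬ pvKey v = 8 := fun hc => absurd ((pvKey_eq8_iff v).1 hc) (by omega)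
  unfold pvKey at this ⊢
  omega

/-- Head of a nonempty dropWhile result fails the predicate. -/
theorem pvDropWhileHead {A : Type} (p : A -> Bool) :
    ∀ (t : List A) (r : A) (rs : List A), t.dropWhile p = r :: rs → p r = false := by
  intro t
  induction t with
  | nil => intro r rs h; simp at h
  | cons a t ih =>
    intro r rs h
    by_cases hp : p a
    · rw [List.dropWhile_cons_of_pos hp] at h; exact ih r rs h
    · rw [List.dropWhile_cons_of_neg hp] at h
      cases h
      simpa using hp

/-- The run scan on a sorted list of keys ≤ 8 counts the distinct non-8 keys
    and the number of 8s. -/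
theorem pvRunsEq : ∀ (n : Nat) (keys : List Int), keys.length ≤ n →
    keys.Pairwise (· ≤ ·) → (∀ x ∈ keys, x ≤ 8) → ∀ (b w : Int),
    pvRuns keys b w
      = (b + ((keys.filter (fun x => decide (x ≠ 8))).toFinset.card : Int),
         if keys.count 8 = 0 then w else (keys.count 8 : Int)) := by
  intro n
  induction n with
  | zero =>
    intro keys hlen _ _ b w
    have : keys = [] := List.eq_nil_of_length_eq_zero (Nat.le_zero.mp hlen)
    subst this
    simp [pvRuns]
  | succ n ih =>
    intro keys hlen hsort hle b w
    match keys with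
    | [] => simp [pvRuns]
    | k :: t =>
      have htsort : t.Pairwise (· ≤ ·) := hsort.of_cons
      have hkt : ∀ x ∈ t, k ≤ x := fun x hx => (List.pairwise_cons.1 hsort).1 x hx
      by_cases hk : k = 8
      · subst hk
        have hall : ∀ x ∈ t, x = 8 := fun x hx =>
          le_antisymm (hle x (List.mem_cons_of_mem _ hx)) (hkt x hx)
        have htw : t.takeWhile (fun x => x == (8:Int)) = t :=
          List.takeWhile_eq_self_iff.2 (fun x hx => by simp [hall x hx])
        have hdw : t.dropWhile (fun x => x == (8:Int)) = [] :=
          List.dropWhile_eq_nil_iff.2 (fun x hx => by simp [hall x hx])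
        have hcnt : (8 :: t).count 8 = (8 :: t).length :=
          List.count_eq_length.2 (fun x hx => by
            rcases List.mem_cons.1 hx with h | h
            · simp [h]
            · simp [hall x h])
        have hfil : (8 :: t).filter (fun x => decide (x ≠ 8)) = [] := by
          rw [List.filter_eq_nil_iff]
          intro x hx
          rcases List.mem_cons.1 hx with h | h
          · simp [h]
          · simp [hall x h]
        rw [show pvRuns (8 :: t) b w
              = pvRuns (t.dropWhile (fun x => x == (8:Int))) b
                  (1 + ((t.takeWhile (fun x => x == (8:Int))).length : Int)) by
            simp [pvRuns]]
        rw [htw, hdw, hfil, hcnt]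
        simp [pvRuns]
        omega
      · -- k ≠ 8
        have hspan := List.takeWhile_append_dropWhile (p := fun x => x == k) (l := t)
        set tw := t.takeWhile (fun x => x == k) with htw
        set rest := t.dropWhile (fun x => x == k) with hrest
        have htwk : ∀ x ∈ tw, x = k := fun x hx => by
          have := List.mem_takeWhile_imp hx
          simpa using this
        have hrsub : rest.Sublist t := List.dropWhile_sublist _
        have hrsort : rest.Pairwise (· ≤ ·) := htsort.sublist hrsub
        have hrle : ∀ x ∈ rest, x ≤ 8 := fun x hx =>
          hle x (List.mem_cons_of_mem _ (hrsub.mem hx))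
        have hknr : k ∉ rest := by
          match hr : rest with
          | [] => simp
          | r :: rs =>
            have hdrop : t.dropWhile (fun x => x == k) = r :: rs := hrest.symm
            have hrne : ((r == k) = false) := pvDropWhileHead _ t r rs hdrop
            have hrmem : r ∈ t := hrsub.mem (by simp)
            have hrk : k < r :=
              lt_of_le_of_ne (hkt r hrmem) (fun h => by simp [h] at hrne)
            intro hmem
            rcases List.mem_cons.1 hmem with h | h
            · omega
            · have : r ≤ k := (List.pairwise_cons.1 hrsort).1 k h
              omega
        have hlen' : rest.length ≤ n := by
          have h1 : rest.length ≤ t.length := t.length_dropWhile_le _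
          have h2 : t.length + 1 ≤ n + 1 := by simpa using hlen
          omega
        have hIH := ih rest hlen' hrsort hrle (b + 1) w
        rw [show pvRuns (k :: t) b w = pvRuns rest (b + 1) w by
              simp only [pvRuns, ← htw, ← hrest]
              rw [if_neg hk]]
        rw [hIH]
        have hc8 : (k :: t).count 8 = rest.count 8 := by
          rw [show k :: t = (k :: tw) ++ rest by rw [List.cons_append, hspan],
              List.count_append]
          have : (k :: tw).count 8 = 0 := by
            rw [List.count_eq_zero]
            intro hmem
            rcases List.mem_cons.1 hmem with h | h
            · exact hk h.symm
            · exact hk ((htwk 8 h).symm)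
          omega
        have hfilt : (k :: t).filter (fun x => decide (x ≠ 8))
            = (k :: tw) ++ rest.filter (fun x => decide (x ≠ 8)) := by
          rw [show k :: t = (k :: tw) ++ rest by rw [List.cons_append, hspan],
              List.filter_append]
          congr 1
          rw [List.filter_eq_self]
          intro x hx
          rcases List.mem_cons.1 hx with h | h
          · simp [h, hk]
          · simp [htwk x h, hk]
        have hfinset : ((k :: t).filter (fun x => decide (x ≠ 8))).toFinset
            = insert k (rest.filter (fun x => decide (x ≠ 8))).toFinset := by
          rw [hfilt]
          apply Finset.ext; intro a
          simp only [List.toFinset_append, Finset.mem_union, List.mem_toFinset,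
            Finset.mem_insert, List.mem_cons]
          constructor
          · rintro (⟨h | h⟩ | h)
            · exact Or.inl h
            · exact Or.inl (htwk a h)
            · exact Or.inr h
          · rintro (h | h)
            · exact Or.inl (Or.inl h)
            · exact Or.inr h
        have hcard : ((k :: t).filter (fun x => decide (x ≠ 8))).toFinset.card
            = 1 + (rest.filter (fun x => decide (x ≠ 8))).toFinset.card := by
          rw [hfinset, Finset.card_insert_of_notMem (by
            intro hmem
            exact hknr (List.mem_of_mem_filter (List.mem_toFinset.1 hmem)))]
          omega
        rw [hc8, hcard, Prod.mk.injEq]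
        constructor
        · push_cast; ring
        · rfl

/-- B equals the same closed form. -/
theorem pvBEq (l : List Int) :
    get_color_type_alt l
    = (let B : Int := (((l.filter (fun v => decide (v < 3200))).map
          (fun v => PySem.Int.floordiv v 400)).toFinset.card : Int)
       let W : Int := (l.countP (fun v => decide (3200 ≤ v)) : Int)
       ((if W = 0 then B else max B 1), B + W)) := by
  have hdef : get_color_type_alt l
      = (if (pvRuns (PySem.List.sorted (l.map pvKey) (fun x => x) false) 0 0).2 = 0
           then (pvRuns (PySem.List.sorted (l.map pvKey) (fun x => x) false) 0 0).1
           else max (pvRuns (PySem.List.sorted (l.map pvKey) (fun x => x) false) 0 0).1 1,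
         (pvRuns (PySem.List.sorted (l.map pvKey) (fun x => x) false) 0 0).1
           + (pvRuns (PySem.List.sorted (l.map pvKey) (fun x => x) false) 0 0).2) := rfl
  rw [hdef]
  have hperm : (PySem.List.sorted (l.map pvKey) (fun x => x) false).Perm (l.map pvKey) :=
    PySem.List.sorted_perm _ _ _
  have hsort : (PySem.List.sorted (l.map pvKey) (fun x => x) false).Pairwise (· ≤ ·) :=
    PySem.List.sorted_pairwise _ _
  have hle : ∀ x ∈ PySem.List.sorted (l.map pvKey) (fun x => x) false, x ≤ 8 := by
    intro x hx
    have : x ∈ l.map pvKey := ((PySem.List.mem_sorted _ _ _ _).1 hx)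
    obtain ⟨v, _, rfl⟩ := List.mem_map.1 this
    exact pvKey_le v
  rw [pvRunsEq (PySem.List.sorted (l.map pvKey) (fun x => x) false).length _ le_rfl
      hsort hle 0 0]
  -- count of 8s = wild count
  have hcnt : (PySem.List.sorted (l.map pvKey) (fun x => x) false).count 8
      = l.countP (fun v => decide (3200 ≤ v)) := by
    rw [hperm.count_eq]
    rw [List.count_eq_countP, List.countP_map]
    apply List.countP_congr
    intro v _
    simp only [Function.comp, beq_iff_eq, decide_eq_true_eq]
    exact pvKey_eq8_iff v
  -- distinct non-8 keys = distinct colors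
  have hfin : ((PySem.List.sorted (l.map pvKey) (fun x => x) false).filter
        (fun x => decide (x ≠ 8))).toFinset
      = ((l.filter (fun v => decide (v < 3200))).map
          (fun v => PySem.Int.floordiv v 400)).toFinset := by
    rw [List.toFinset_eq_of_perm _ _ (hperm.filter _)]
    congr 1
    rw [List.filter_map]
    have hf : l.filter ((fun x => decide (x ≠ 8)) ∘ pvKey)
        = l.filter (fun v => decide (v < 3200)) := by
      apply List.filter_congr
      intro v _
      simp only [Function.comp, decide_eq_decide]
      constructor
      · intro h
        by_contra hc
        exact h ((pvKey_eq8_iff v).2 (by omega))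
      · intro h hc
        have := (pvKey_eq8_iff v).1 hc
        omega
    rw [hf]
    apply List.map_congr_left
    intro v hv
    have hvlt : v < 3200 := by
      have := (List.mem_filter.1 hv).2
      simpa using this
    exact pvKey_lt v hvlt
  rw [hcnt, hfin]
  by_cases hz : l.countP (fun v => decide (3200 ≤ v)) = 0
  · simp [hz]
  · have hz' : (l.countP (fun v => decide (3200 ≤ v)) : Int) ≠ 0 := by exact_mod_cast hz
    simp only [hz, if_false, hz', zero_add]

-- ===== VERDICT (by name: the statement is the Claim_ definition above) =====
theorem get_color_type_spec : Claim_equal_get_color_type := by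
  intro l _
  unfold Spec_get_color_type
  rw [pvAEq, pvBEq]
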